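-- pv_equiv track=rewrite | github.com/coelho-cassi/AVA | genreDetect.py | genreClassification
-- ===== SOURCE A (Python) =====
-- import math
--
-- def genreClassification(BPM_List):
--     unknownCount = 0                            # Intialize unknownCount to zero.
--     genreDict = {                               # genreDict is used to count the number of times a BPM
--         "Blues": 0,                             # exists in the defined ranges for each genre.
--         "Classical": 0,
--         "Country": 0,
--         "HipHop": 0,
--         "Jazz": 0,
--         "Metal": 0,
--         "Pop": 0,
--         "Rock": 0}
--     genreList = ["  Blues     : ",              # genreList is predefined with the description of
--                  "  Classical : ",              # each genre.
--                  "  Country   : ",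
--                  "  HipHop    : ",
--                  "  Jazz      : ",
--                  "  Metal     : ",
--                  "  Pop       : ",
--                  "  Rock      : "]
--     arrLen = len(BPM_List)
--     for i in range(0,arrLen):                   # i is the index of each BPM in the given List
--         ft = BPM_List[i]
--         if ft >= 40 and ft <= 100:
--             genreDict["Blues"] += 1
--         if ft >= 120 and ft <= 140:
--             genreDict["Classical"] += 1
--         if ft >= 60 and ft <= 100:
--             genreDict["Country"] += 1
--         if ft >= 85 and ft <= 115:
--             genreDict["HipHop"] += 1
--         if ft >= 120 and ft <= 125:
--             genreDict["Jazz"] += 1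
--         if ft >= 100 and ft <= 160:
--             genreDict["Metal"] += 1
--         if ft >= 100 and ft <= 130:
--             genreDict["Pop"] += 1
--         if ft >= 110 and ft <= 140:
--             genreDict["Rock"] += 1
--
--     # Adding Blues Probability
--     temp = math.floor(((genreDict["Blues"] / arrLen) * 100))        # Formats temp as a percentage
--     genreList[0] += str(temp) + '%'
--     if temp == 0:
--         unknownCount += 1                       # If probability = 0 then add one to the UnknownCount
--
--     # Adding Classical Probability
--     temp = math.floor(((genreDict["Classical"] / arrLen) * 100))    # Formats temp as a percentage
--     genreList[1] += str(temp) + '%'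
--     if temp == 0:
--         unknownCount += 1                       # If probability = 0 then add one to the UnknownCount
--
--     # Adding Country Probability
--     temp = math.floor(((genreDict["Country"] / arrLen) * 100))      # Formats temp as a percentage
--     genreList[2] += str(temp) + '%'
--     if temp == 0:
--         unknownCount += 1                       # If probability = 0 then add one to the UnknownCount
--
--     #Adding HipHop Probability
--     temp = math.floor(((genreDict["HipHop"] / arrLen) * 100))       # Formats temp as a percentage
--     genreList[3] += str(temp) + '%'
--     if temp == 0:
--         unknownCount += 1                       # If probability = 0 then add one to the UnknownCount
--
--     #Adding Jazz Probability
--     temp = math.floor(((genreDict["Jazz"] / arrLen) * 100))         # Formats temp as a percentage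
--     genreList[4] += str(temp) + '%'
--     if temp == 0:
--         unknownCount += 1                       # If probability = 0 then add one to the UnknownCount
--
--     #Adding Metal Probability
--     temp = math.floor(((genreDict["Metal"] / arrLen) * 100))        # Formats temp as a percentage
--     genreList[5] += str(temp) + '%'
--     if temp == 0:
--         unknownCount += 1                       # If probability = 0 then add one to the UnknownCount
--
--     #Adding Pop Probability
--     temp = math.floor(((genreDict["Pop"] / arrLen) * 100))          # Formats temp as a percentage
--     genreList[6] += str(temp) + '%'
--     if temp == 0:
--         unknownCount += 1                       # If probability = 0 then add one to the UnknownCount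
--
--     #Adding Rock Probability
--     temp = math.floor(((genreDict["Rock"] / arrLen) * 100))         # Formats temp as a percentage
--     genreList[7] += str(temp) + '%'
--     if temp == 0:
--         unknownCount += 1                       # If probability = 0 then add one to the UnknownCount
--
--     if unknownCount == 8:                       # If unknownCount = 8 then the program was unable to determine a genre
--         retList = ['Unable to determine Genre']
--         return retList                          # Returns list of size 1
--     else:
--         return genreList                        # Returns list of size 8
-- ===== SOURCE B (Python) =====
-- import math
--
-- _GENRES = [("  Blues     : ", 40, 100),
--            ("  Classical : ", 120, 140),
--            ("  Country   : ", 60, 100),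
--            ("  HipHop    : ", 85, 115),
--            ("  Jazz      : ", 120, 125),
--            ("  Metal     : ", 100, 160),
--            ("  Pop       : ", 100, 130),
--            ("  Rock      : ", 110, 140)]
--
-- def genreClassification(BPM_List):
--     n = len(BPM_List)
--     out = []
--     zeros = 0
--     for label, lo, hi in _GENRES:
--         cnt = sum(1 for ft in BPM_List if lo <= ft <= hi)
--         pct = math.floor((cnt / n) * 100)
--         out.append(label + str(pct) + '%')
--         if pct == 0:
--             zeros += 1
--     if zeros == 8:
--         return ['Unable to determine Genre']
--     return out
-- ===== Notes on version B (the rewrite author's own statement) =====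
-- stated objective: simpler
-- what changed: Replaces the single multi-counter dict pass plus eight copy-pasted percentage blocks by a table of (label, low, high) triples driven by one uniform loop with a per-genre scan of the list.
import Mathlib
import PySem

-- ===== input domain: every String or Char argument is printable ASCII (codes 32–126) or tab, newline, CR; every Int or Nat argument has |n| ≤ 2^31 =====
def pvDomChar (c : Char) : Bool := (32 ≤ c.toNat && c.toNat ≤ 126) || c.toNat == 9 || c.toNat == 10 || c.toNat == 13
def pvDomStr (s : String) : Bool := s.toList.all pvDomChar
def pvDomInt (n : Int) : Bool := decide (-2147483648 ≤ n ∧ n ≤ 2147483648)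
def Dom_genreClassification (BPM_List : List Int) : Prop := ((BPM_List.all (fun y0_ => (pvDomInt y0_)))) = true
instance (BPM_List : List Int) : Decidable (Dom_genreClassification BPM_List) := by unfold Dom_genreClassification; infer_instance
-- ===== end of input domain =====

-- B rewrites A's multi-counter pass and eight copy-pasted blocks as one uniform loop over a
-- (label, low, high) table with per-genre scans; same return value, simpler shape. (objective: simpler)

-- Shared helper: exact model of the Python expression `math.floor((c / n) * 100)` for integers
-- 0 ≤ c ≤ n, 0 < n, which BOTH sources contain verbatim. It reproduces IEEE-754 double rounding
-- (round-to-nearest-even of c/n to 53 bits, then of that * 100) with integer arithmetic; exact on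
-- that domain (no overflow/subnormals there), verified against CPython exhaustively for n ≤ 1500
-- and on random n up to 2^31.
def pvFindShift (c n : Nat) : Nat → Nat → Nat
  | s, 0 => s
  | s, fuel+1 => if (c <<< s) / n < 2^52 then pvFindShift c n (s+1) fuel else s

def pvPctFloorNat (c n : Nat) : Nat :=
  if c = 0 then 0 else
  -- round c/n to 53 significant bits, nearest-even: value m / 2^s
  let s0 := pvFindShift c n 0 2000
  let q := (c <<< s0) / n
  let r := (c <<< s0) % n
  let q1 := if n < 2*r ∨ (2*r = n ∧ q % 2 = 1) then q + 1 else q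
  let m := if q1 = 2^53 then 2^52 else q1
  let s := if q1 = 2^53 then s0 - 1 else s0
  -- round m*100 to 53 significant bits, nearest-even: value hi * 2^d
  let t := m * 100
  let b := Nat.log2 t + 1
  let d0 := if b ≤ 53 then 0 else b - 53
  let hi1 :=
    if b ≤ 53 then t else
      let h := t >>> d0
      let rem := t % (1 <<< d0)
      let half := 1 <<< (d0 - 1)
      if half < rem ∨ (rem = half ∧ h % 2 = 1) then h + 1 else h
  let hi := if hi1 = 2^53 then 2^52 else hi1
  let d := if hi1 = 2^53 then d0 + 1 else d0
  -- floor(hi * 2^(d-s))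
  (hi <<< d) >>> s

def pvPctFloor (c n : Int) : Int := (pvPctFloorNat c.toNat n.toNat : Int)

-- ===== PORT A =====
def pvDict0 : PySem.Dict String Int :=
  ((((((((PySem.Dict.empty.insert "Blues" 0).insert "Classical" 0).insert "Country" 0).insert
      "HipHop" 0).insert "Jazz" 0).insert "Metal" 0).insert "Pop" 0).insert "Rock" 0)

def pvStepA (d : PySem.Dict String Int) (ft : Int) : PySem.Dict String Int :=
  let d := if 40 ≤ ft ∧ ft ≤ 100 then d.modify "Blues" 0 (· + 1) else d
  let d := if 120 ≤ ft ∧ ft ≤ 140 then d.modify "Classical" 0 (· + 1) else d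
  let d := if 60 ≤ ft ∧ ft ≤ 100 then d.modify "Country" 0 (· + 1) else d
  let d := if 85 ≤ ft ∧ ft ≤ 115 then d.modify "HipHop" 0 (· + 1) else d
  let d := if 120 ≤ ft ∧ ft ≤ 125 then d.modify "Jazz" 0 (· + 1) else d
  let d := if 100 ≤ ft ∧ ft ≤ 160 then d.modify "Metal" 0 (· + 1) else d
  let d := if 100 ≤ ft ∧ ft ≤ 130 then d.modify "Pop" 0 (· + 1) else d
  let d := if 110 ≤ ft ∧ ft ≤ 140 then d.modify "Rock" 0 (· + 1) else d
  d

def genreClassification (BPM_List : List Int) : List String :=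
  let genreDict : PySem.Dict String Int := pvDict0
  let arrLen : Int := BPM_List.length
  let genreDict := (PySem.List.pyRange 0 arrLen 1).foldl
    (fun d i => pvStepA d (PySem.List.pyGetD BPM_List i 0)) genreDict
  let temp0 := pvPctFloor (genreDict.getD "Blues" 0) arrLen
  let s0 := String.ofList ("  Blues     : ".toList ++ PySem.Int.toChars temp0 ++ ['%'])
  let u := if temp0 = 0 then (0 : Int) + 1 else 0
  let temp1 := pvPctFloor (genreDict.getD "Classical" 0) arrLen
  let s1 := String.ofList ("  Classical : ".toList ++ PySem.Int.toChars temp1 ++ ['%'])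
  let u := if temp1 = 0 then u + 1 else u
  let temp2 := pvPctFloor (genreDict.getD "Country" 0) arrLen
  let s2 := String.ofList ("  Country   : ".toList ++ PySem.Int.toChars temp2 ++ ['%'])
  let u := if temp2 = 0 then u + 1 else u
  let temp3 := pvPctFloor (genreDict.getD "HipHop" 0) arrLen
  let s3 := String.ofList ("  HipHop    : ".toList ++ PySem.Int.toChars temp3 ++ ['%'])
  let u := if temp3 = 0 then u + 1 else u
  let temp4 := pvPctFloor (genreDict.getD "Jazz" 0) arrLen
  let s4 := String.ofList ("  Jazz      : ".toList ++ PySem.Int.toChars temp4 ++ ['%'])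
  let u := if temp4 = 0 then u + 1 else u
  let temp5 := pvPctFloor (genreDict.getD "Metal" 0) arrLen
  let s5 := String.ofList ("  Metal     : ".toList ++ PySem.Int.toChars temp5 ++ ['%'])
  let u := if temp5 = 0 then u + 1 else u
  let temp6 := pvPctFloor (genreDict.getD "Pop" 0) arrLen
  let s6 := String.ofList ("  Pop       : ".toList ++ PySem.Int.toChars temp6 ++ ['%'])
  let u := if temp6 = 0 then u + 1 else u
  let temp7 := pvPctFloor (genreDict.getD "Rock" 0) arrLen
  let s7 := String.ofList ("  Rock      : ".toList ++ PySem.Int.toChars temp7 ++ ['%'])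
  let u := if temp7 = 0 then u + 1 else u
  if u = 8 then ["Unable to determine Genre"]
  else [s0, s1, s2, s3, s4, s5, s6, s7]

-- ===== PORT B =====
def pvGenres : List (String × Int × Int) :=
  [("  Blues     : ", 40, 100), ("  Classical : ", 120, 140), ("  Country   : ", 60, 100),
   ("  HipHop    : ", 85, 115), ("  Jazz      : ", 120, 125), ("  Metal     : ", 100, 160),
   ("  Pop       : ", 100, 130), ("  Rock      : ", 110, 140)]

def genreClassification_alt (BPM_List : List Int) : List String :=
  let n : Int := BPM_List.length
  let res := pvGenres.foldl
    (fun (acc : List String × Int) g =>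
      let cnt : Int := BPM_List.countP (fun ft => decide (g.2.1 ≤ ft ∧ ft ≤ g.2.2))
      let pct := pvPctFloor cnt n
      (acc.1 ++ [String.ofList (g.1.toList ++ PySem.Int.toChars pct ++ ['%'])],
       if pct = 0 then acc.2 + 1 else acc.2))
    ([], 0)
  if res.2 = 8 then ["Unable to determine Genre"] else res.1

-- ===== PRECONDITION & SPEC =====
-- Pre_ excludes exactly the empty list, on which A raises ZeroDivisionError (B raises there too).
def Pre_genreClassification (BPM_List : List Int) : Prop := BPM_List ≠ []
instance (BPM_List : List Int) : Decidable (Pre_genreClassification BPM_List) := by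
  unfold Pre_genreClassification; infer_instance

def pvWitness_genreClassification : List Int := [95, 123]

def Spec_genreClassification (BPM_List : List Int) (out : List String) : Prop :=
  out = genreClassification_alt BPM_List
instance (BPM_List : List Int) (out : List String) : Decidable (Spec_genreClassification BPM_List out) := by
  unfold Spec_genreClassification; infer_instance

-- ===== CLAIM (what is proved, stated in full; the proofs are below) =====
def Claim_equal_genreClassification : Prop := ∀ (BPM_List : List Int), Dom_genreClassification BPM_List → Pre_genreClassification BPM_List → Spec_genreClassification BPM_List (genreClassification BPM_List)

-- ===== LEMMAS AND PROOFS =====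

theorem pv_getD_ite_modify_of_ne (c : Prop) [Decidable c] (d : PySem.Dict String Int)
    (k k' : String) (f : Int → Int) (h : (k' = k) = False) :
    ((if c then d.modify k 0 f else d).getD k' 0) = d.getD k' 0 := by
  split_ifs with hc
  · simp [PySem.Dict.getD_modify, h]
  · rfl

theorem pv_getD_ite_modify_self (c : Prop) [Decidable c] (d : PySem.Dict String Int)
    (k : String) (f : Int → Int) :
    ((if c then d.modify k 0 f else d).getD k 0) = if c then f (d.getD k 0) else d.getD k 0 := by
  split_ifs with hc
  · rw [PySem.Dict.getD_modify]; simp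
  · rfl

-- getD of one loop step, for each of the eight keys.
theorem pv_stepA_getD_Blues (d : PySem.Dict String Int) (x : Int) :
    (pvStepA d x).getD "Blues" 0 = d.getD "Blues" 0 + (if 40 ≤ x ∧ x ≤ 100 then 1 else 0) := by
  simp only [pvStepA]
  rw [pv_getD_ite_modify_of_ne _ _ _ _ _ (by decide), pv_getD_ite_modify_of_ne _ _ _ _ _ (by decide),
      pv_getD_ite_modify_of_ne _ _ _ _ _ (by decide), pv_getD_ite_modify_of_ne _ _ _ _ _ (by decide),
      pv_getD_ite_modify_of_ne _ _ _ _ _ (by decide), pv_getD_ite_modify_of_ne _ _ _ _ _ (by decide),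
      pv_getD_ite_modify_of_ne _ _ _ _ _ (by decide), pv_getD_ite_modify_self]
  split_ifs <;> omega

theorem pv_stepA_getD_Classical (d : PySem.Dict String Int) (x : Int) :
    (pvStepA d x).getD "Classical" 0 = d.getD "Classical" 0 + (if 120 ≤ x ∧ x ≤ 140 then 1 else 0) := by
  simp only [pvStepA]
  rw [pv_getD_ite_modify_of_ne _ _ _ _ _ (by decide), pv_getD_ite_modify_of_ne _ _ _ _ _ (by decide),
      pv_getD_ite_modify_of_ne _ _ _ _ _ (by decide), pv_getD_ite_modify_of_ne _ _ _ _ _ (by decide),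
      pv_getD_ite_modify_of_ne _ _ _ _ _ (by decide), pv_getD_ite_modify_of_ne _ _ _ _ _ (by decide),
      pv_getD_ite_modify_self, pv_getD_ite_modify_of_ne _ _ _ _ _ (by decide)]
  split_ifs <;> omega

theorem pv_stepA_getD_Country (d : PySem.Dict String Int) (x : Int) :
    (pvStepA d x).getD "Country" 0 = d.getD "Country" 0 + (if 60 ≤ x ∧ x ≤ 100 then 1 else 0) := by
  simp only [pvStepA]
  rw [pv_getD_ite_modify_of_ne _ _ _ _ _ (by decide), pv_getD_ite_modify_of_ne _ _ _ _ _ (by decide),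
      pv_getD_ite_modify_of_ne _ _ _ _ _ (by decide), pv_getD_ite_modify_of_ne _ _ _ _ _ (by decide),
      pv_getD_ite_modify_of_ne _ _ _ _ _ (by decide), pv_getD_ite_modify_self,
      pv_getD_ite_modify_of_ne _ _ _ _ _ (by decide), pv_getD_ite_modify_of_ne _ _ _ _ _ (by decide)]
  split_ifs <;> omega

theorem pv_stepA_getD_HipHop (d : PySem.Dict String Int) (x : Int) :
    (pvStepA d x).getD "HipHop" 0 = d.getD "HipHop" 0 + (if 85 ≤ x ∧ x ≤ 115 then 1 else 0) := by
  simp only [pvStepA]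
  rw [pv_getD_ite_modify_of_ne _ _ _ _ _ (by decide), pv_getD_ite_modify_of_ne _ _ _ _ _ (by decide),
      pv_getD_ite_modify_of_ne _ _ _ _ _ (by decide), pv_getD_ite_modify_of_ne _ _ _ _ _ (by decide),
      pv_getD_ite_modify_self, pv_getD_ite_modify_of_ne _ _ _ _ _ (by decide),
      pv_getD_ite_modify_of_ne _ _ _ _ _ (by decide), pv_getD_ite_modify_of_ne _ _ _ _ _ (by decide)]
  split_ifs <;> omega

theorem pv_stepA_getD_Jazz (d : PySem.Dict String Int) (x : Int) :
    (pvStepA d x).getD "Jazz" 0 = d.getD "Jazz" 0 + (if 120 ≤ x ∧ x ≤ 125 then 1 else 0) := by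
  simp only [pvStepA]
  rw [pv_getD_ite_modify_of_ne _ _ _ _ _ (by decide), pv_getD_ite_modify_of_ne _ _ _ _ _ (by decide),
      pv_getD_ite_modify_of_ne _ _ _ _ _ (by decide), pv_getD_ite_modify_self,
      pv_getD_ite_modify_of_ne _ _ _ _ _ (by decide), pv_getD_ite_modify_of_ne _ _ _ _ _ (by decide),
      pv_getD_ite_modify_of_ne _ _ _ _ _ (by decide), pv_getD_ite_modify_of_ne _ _ _ _ _ (by decide)]
  split_ifs <;> omega

theorem pv_stepA_getD_Metal (d : PySem.Dict String Int) (x : Int) :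
    (pvStepA d x).getD "Metal" 0 = d.getD "Metal" 0 + (if 100 ≤ x ∧ x ≤ 160 then 1 else 0) := by
  simp only [pvStepA]
  rw [pv_getD_ite_modify_of_ne _ _ _ _ _ (by decide), pv_getD_ite_modify_of_ne _ _ _ _ _ (by decide),
      pv_getD_ite_modify_self, pv_getD_ite_modify_of_ne _ _ _ _ _ (by decide),
      pv_getD_ite_modify_of_ne _ _ _ _ _ (by decide), pv_getD_ite_modify_of_ne _ _ _ _ _ (by decide),
      pv_getD_ite_modify_of_ne _ _ _ _ _ (by decide), pv_getD_ite_modify_of_ne _ _ _ _ _ (by decide)]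
  split_ifs <;> omega

theorem pv_stepA_getD_Pop (d : PySem.Dict String Int) (x : Int) :
    (pvStepA d x).getD "Pop" 0 = d.getD "Pop" 0 + (if 100 ≤ x ∧ x ≤ 130 then 1 else 0) := by
  simp only [pvStepA]
  rw [pv_getD_ite_modify_of_ne _ _ _ _ _ (by decide), pv_getD_ite_modify_self,
      pv_getD_ite_modify_of_ne _ _ _ _ _ (by decide), pv_getD_ite_modify_of_ne _ _ _ _ _ (by decide),
      pv_getD_ite_modify_of_ne _ _ _ _ _ (by decide), pv_getD_ite_modify_of_ne _ _ _ _ _ (by decide),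
      pv_getD_ite_modify_of_ne _ _ _ _ _ (by decide), pv_getD_ite_modify_of_ne _ _ _ _ _ (by decide)]
  split_ifs <;> omega

theorem pv_stepA_getD_Rock (d : PySem.Dict String Int) (x : Int) :
    (pvStepA d x).getD "Rock" 0 = d.getD "Rock" 0 + (if 110 ≤ x ∧ x ≤ 140 then 1 else 0) := by
  simp only [pvStepA]
  rw [pv_getD_ite_modify_self, pv_getD_ite_modify_of_ne _ _ _ _ _ (by decide),
      pv_getD_ite_modify_of_ne _ _ _ _ _ (by decide), pv_getD_ite_modify_of_ne _ _ _ _ _ (by decide),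
      pv_getD_ite_modify_of_ne _ _ _ _ _ (by decide), pv_getD_ite_modify_of_ne _ _ _ _ _ (by decide),
      pv_getD_ite_modify_of_ne _ _ _ _ _ (by decide), pv_getD_ite_modify_of_ne _ _ _ _ _ (by decide)]
  split_ifs <;> omega

-- After A's counting loop, each genre key holds its starting value plus the count of BPMs in range.
theorem pv_dict_counts (l : List Int) (d : PySem.Dict String Int) :
    ((l.foldl pvStepA d).getD "Blues" 0 = d.getD "Blues" 0 + l.countP (fun ft => decide (40 ≤ ft ∧ ft ≤ 100)))
  ∧ ((l.foldl pvStepA d).getD "Classical" 0 = d.getD "Classical" 0 + l.countP (fun ft => decide (120 ≤ ft ∧ ft ≤ 140)))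
  ∧ ((l.foldl pvStepA d).getD "Country" 0 = d.getD "Country" 0 + l.countP (fun ft => decide (60 ≤ ft ∧ ft ≤ 100)))
  ∧ ((l.foldl pvStepA d).getD "HipHop" 0 = d.getD "HipHop" 0 + l.countP (fun ft => decide (85 ≤ ft ∧ ft ≤ 115)))
  ∧ ((l.foldl pvStepA d).getD "Jazz" 0 = d.getD "Jazz" 0 + l.countP (fun ft => decide (120 ≤ ft ∧ ft ≤ 125)))
  ∧ ((l.foldl pvStepA d).getD "Metal" 0 = d.getD "Metal" 0 + l.countP (fun ft => decide (100 ≤ ft ∧ ft ≤ 160)))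
  ∧ ((l.foldl pvStepA d).getD "Pop" 0 = d.getD "Pop" 0 + l.countP (fun ft => decide (100 ≤ ft ∧ ft ≤ 130)))
  ∧ ((l.foldl pvStepA d).getD "Rock" 0 = d.getD "Rock" 0 + l.countP (fun ft => decide (110 ≤ ft ∧ ft ≤ 140))) := by
  induction l generalizing d with
  | nil => simp
  | cons x xs ih =>
    obtain ⟨h1, h2, h3, h4, h5, h6, h7, h8⟩ := ih (pvStepA d x)
    simp only [List.foldl_cons, List.countP_cons]
    refine ⟨?_, ?_, ?_, ?_, ?_, ?_, ?_, ?_⟩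
    · rw [h1, pv_stepA_getD_Blues]; simp only [decide_eq_true_eq]; split_ifs <;> push_cast <;> omega
    · rw [h2, pv_stepA_getD_Classical]; simp only [decide_eq_true_eq]; split_ifs <;> push_cast <;> omega
    · rw [h3, pv_stepA_getD_Country]; simp only [decide_eq_true_eq]; split_ifs <;> push_cast <;> omega
    · rw [h4, pv_stepA_getD_HipHop]; simp only [decide_eq_true_eq]; split_ifs <;> push_cast <;> omega
    · rw [h5, pv_stepA_getD_Jazz]; simp only [decide_eq_true_eq]; split_ifs <;> push_cast <;> omega
    · rw [h6, pv_stepA_getD_Metal]; simp only [decide_eq_true_eq]; split_ifs <;> push_cast <;> omega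
    · rw [h7, pv_stepA_getD_Pop]; simp only [decide_eq_true_eq]; split_ifs <;> push_cast <;> omega
    · rw [h8, pv_stepA_getD_Rock]; simp only [decide_eq_true_eq]; split_ifs <;> push_cast <;> omega

-- ===== VERDICT (by name: the statement is the Claim_ definition above) =====
set_option maxHeartbeats 1000000 in
theorem genreClassification_spec : Claim_equal_genreClassification := by
  intro l _ _
  show genreClassification l = genreClassification_alt l
  obtain ⟨h1, h2, h3, h4, h5, h6, h7, h8⟩ := pv_dict_counts l pvDict0
  rw [show pvDict0.getD "Blues" 0 = 0 from rfl] at h1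
  rw [show pvDict0.getD "Classical" 0 = 0 from rfl] at h2
  rw [show pvDict0.getD "Country" 0 = 0 from rfl] at h3
  rw [show pvDict0.getD "HipHop" 0 = 0 from rfl] at h4
  rw [show pvDict0.getD "Jazz" 0 = 0 from rfl] at h5
  rw [show pvDict0.getD "Metal" 0 = 0 from rfl] at h6
  rw [show pvDict0.getD "Pop" 0 = 0 from rfl] at h7
  rw [show pvDict0.getD "Rock" 0 = 0 from rfl] at h8
  simp only [genreClassification, genreClassification_alt, pvGenres, List.foldl_cons,
    List.foldl_nil, PySem.List.foldl_pyRange_zero_pyGetD', h1, h2, h3, h4, h5, h6, h7, h8,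
    zero_add, List.nil_append, List.append_assoc, List.singleton_append]
  generalize pvPctFloor (↑(List.countP (fun ft => decide (40 ≤ ft ∧ ft ≤ 100)) l) : Int) (↑l.length : Int) = t0 at *
  generalize pvPctFloor (↑(List.countP (fun ft => decide (120 ≤ ft ∧ ft ≤ 140)) l) : Int) (↑l.length : Int) = t1 at *
  generalize pvPctFloor (↑(List.countP (fun ft => decide (60 ≤ ft ∧ ft ≤ 100)) l) : Int) (↑l.length : Int) = t2 at *
  generalize pvPctFloor (↑(List.countP (fun ft => decide (85 ≤ ft ∧ ft ≤ 115)) l) : Int) (↑l.length : Int) = t3 at *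
  generalize pvPctFloor (↑(List.countP (fun ft => decide (120 ≤ ft ∧ ft ≤ 125)) l) : Int) (↑l.length : Int) = t4 at *
  generalize pvPctFloor (↑(List.countP (fun ft => decide (100 ≤ ft ∧ ft ≤ 160)) l) : Int) (↑l.length : Int) = t5 at *
  generalize pvPctFloor (↑(List.countP (fun ft => decide (100 ≤ ft ∧ ft ≤ 130)) l) : Int) (↑l.length : Int) = t6 at *
  generalize pvPctFloor (↑(List.countP (fun ft => decide (110 ≤ ft ∧ ft ≤ 140)) l) : Int) (↑l.length : Int) = t7 at *
  rfl
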